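-- pv_equiv track=rewrite | github.com/MateoCentis/Guias_Imagenes | TP1/Ejercicio3.py | contar_valores_seguidos
-- ===== SOURCE A (Python) =====
-- def contar_valores_seguidos(arreglo, valor):
--     cantidad_valores_seguidos = 0
--     valores_actuales = 0
--
--     for elemento in arreglo:
--         if elemento == valor:
--             valores_actuales += 1
--             cantidad_valores_seguidos = max(cantidad_valores_seguidos, valores_actuales)
--         else:
--             valores_actuales = 0
--
--     return cantidad_valores_seguidos
-- ===== SOURCE B (Python) =====
-- from itertools import groupby
--
--
-- def contar_valores_seguidos(arreglo, valor):
--     return max((sum(1 for _ in g) for k, g in groupby(arreglo) if k == valor),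
--                default=0)
-- ===== Notes on version B (the rewrite author's own statement) =====
-- stated objective: idiomatic
-- what changed: Replaces the running-counter-with-reset scan by itertools.groupby: the array is decomposed into maximal runs of equal adjacent elements and the answer is the max length over the runs whose key equals valor (default 0).
import Mathlib
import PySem

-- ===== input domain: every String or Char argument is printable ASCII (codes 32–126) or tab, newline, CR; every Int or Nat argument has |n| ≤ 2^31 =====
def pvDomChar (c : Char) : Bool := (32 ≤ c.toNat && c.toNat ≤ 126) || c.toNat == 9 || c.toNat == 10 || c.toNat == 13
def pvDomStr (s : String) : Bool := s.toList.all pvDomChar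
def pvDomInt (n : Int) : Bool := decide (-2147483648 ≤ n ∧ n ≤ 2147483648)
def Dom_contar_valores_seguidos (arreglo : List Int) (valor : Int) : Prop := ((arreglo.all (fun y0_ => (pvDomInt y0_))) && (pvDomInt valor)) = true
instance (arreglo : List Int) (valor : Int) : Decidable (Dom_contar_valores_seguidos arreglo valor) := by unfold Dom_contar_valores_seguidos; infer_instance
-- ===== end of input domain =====

-- B replaces A's running-counter-with-reset scan by a groupby decomposition into
-- maximal runs of equal adjacent elements, taking the max length over matching runs
-- (objective: idiomatic).

-- ===== PORT A =====
-- A's for-loop over the elements, carrying (cantidad_valores_seguidos, valores_actuales).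
def pvGoA (valor best cur : Int) : List Int → Int
  | [] => best
  | e :: rest =>
    if e = valor then pvGoA valor (max best (cur + 1)) (cur + 1) rest
    else pvGoA valor best 0 rest

def contar_valores_seguidos (arreglo : List Int) (valor : Int) : Int :=
  pvGoA valor 0 0 arreglo

-- ===== PORT B =====
-- itertools.groupby: peel off the maximal run of the head element, keep its length
-- if the key equals valor; max over all matching runs, default 0.
def pvRuns (valor : Int) : List Int → Int
  | [] => 0
  | x :: xs =>
    let n : Int := (xs.takeWhile (· == x)).length + 1
    let rest := xs.dropWhile (· == x)
    if x = valor then max n (pvRuns valor rest) else pvRuns valor rest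
termination_by l => l.length
decreasing_by
  all_goals exact Nat.lt_succ_of_le (List.length_dropWhile_le _ _)

def contar_valores_seguidos_alt (arreglo : List Int) (valor : Int) : Int :=
  pvRuns valor arreglo

-- ===== PRECONDITION & SPEC =====
def Spec_contar_valores_seguidos (arreglo : List Int) (valor : Int) (out : Int) : Prop := out = contar_valores_seguidos_alt arreglo valor
instance (arreglo : List Int) (valor : Int) (out : Int) : Decidable (Spec_contar_valores_seguidos arreglo valor out) := by unfold Spec_contar_valores_seguidos; infer_instance

-- ===== CLAIM (what is proved, stated in full; the proofs are below) =====
def Claim_equal_contar_valores_seguidos : Prop := ∀ (arreglo : List Int) (valor : Int), Dom_contar_valores_seguidos arreglo valor → Spec_contar_valores_seguidos arreglo valor (contar_valores_seguidos arreglo valor)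

-- ===== LEMMAS AND PROOFS =====

-- Running A's loop across a block of elements all equal to valor adds the block
-- length to the current counter and records it in the maximum.
theorem pvGoA_run (valor : Int) (p : List Int) (hp : ∀ a ∈ p, a = valor) :
    ∀ (best cur : Int) (rest : List Int),
      pvGoA valor (max best cur) cur (p ++ rest) =
        pvGoA valor (max best (cur + p.length)) (cur + p.length) rest := by
  induction p with
  | nil => intro best cur rest; simp
  | cons a p' ih =>
    intro best cur rest
    have ha : a = valor := hp a (by simp)
    have hp' : ∀ b ∈ p', b = valor := fun b hb => hp b (by simp [hb])
    have h1 : max (max best cur) (cur + 1) = max best (cur + 1) := by omega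
    have h2 : max best (cur + 1) = max (max best (cur + 1)) (cur + 1) := by omega
    calc pvGoA valor (max best cur) cur (a :: p' ++ rest)
        = pvGoA valor (max best (cur + 1)) (cur + 1) (p' ++ rest) := by
          simp [pvGoA, ha, h1]
      _ = pvGoA valor (max (max best (cur + 1)) (cur + 1)) (cur + 1) (p' ++ rest) := by
          rw [← h2]
      _ = pvGoA valor (max best (cur + (a :: p').length)) (cur + (a :: p').length) rest := by
          rw [ih hp']; congr 1 <;> (simp only [List.length_cons]; push_cast; omega)

-- Running A's loop across a block of elements all different from valor just
-- resets (or keeps) the zero counter.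
theorem pvGoA_skip (valor : Int) (p : List Int) (hp : ∀ a ∈ p, a ≠ valor) :
    ∀ (best : Int) (rest : List Int),
      pvGoA valor best 0 (p ++ rest) = pvGoA valor best 0 rest := by
  induction p with
  | nil => intro best rest; simp
  | cons a p' ih =>
    intro best rest
    have ha : a ≠ valor := hp a (by simp)
    have hp' : ∀ b ∈ p', b ≠ valor := fun b hb => hp b (by simp [hb])
    simpa [pvGoA, ha] using ih hp' best rest

theorem pvRuns_nonneg (valor : Int) (l : List Int) : 0 ≤ pvRuns valor l := by
  induction l using pvRuns.induct (valor := valor) with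
  | case1 => rw [pvRuns]
  | case2 xs hrest ih =>
    rw [pvRuns, if_pos rfl]
    exact le_trans (by positivity) (le_max_left _ _)
  | case3 x xs hrest hx ih =>
    rw [pvRuns, if_neg hx]
    exact ih

theorem pvMain (valor : Int) (l : List Int) :
    ∀ best : Int, 0 ≤ best → pvGoA valor best 0 l = max best (pvRuns valor l) := by
  induction l using pvRuns.induct (valor := valor) with
  | case1 =>
    intro best hb
    simp only [pvGoA, pvRuns]
    omega
  | case2 xs hrest ih =>
    intro best hb
    have hall : ∀ a ∈ xs.takeWhile (· == valor), a = valor := by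
      intro a ha
      simpa using List.mem_takeWhile_imp ha
    have hT : (0 : Int) ≤ ((xs.takeWhile (· == valor)).length : Int) := Int.natCast_nonneg _
    have hstep : pvGoA valor best 0 (valor :: xs) = pvGoA valor (max best 1) 1 xs := by
      simp [pvGoA]
    have hrun := pvGoA_run valor (xs.takeWhile (· == valor)) hall (max best 1) 1
      (xs.dropWhile (· == valor))
    rw [List.takeWhile_append_dropWhile] at hrun
    have hmax1 : max (max best 1) 1 = max best 1 := by omega
    rw [hmax1] at hrun
    have hR : pvRuns valor (valor :: xs) =
        max (((xs.takeWhile (· == valor)).length : Int) + 1)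
          (pvRuns valor (xs.dropWhile (· == valor))) := by
      rw [pvRuns, if_pos rfl]
    rw [hstep, hrun, hR]
    rcases hd : xs.dropWhile (· == valor) with _ | ⟨y, ys⟩
    · simp only [pvGoA, pvRuns]
      omega
    · have hne : xs.dropWhile (· == valor) ≠ [] := by simp [hd]
      have hy : y ≠ valor := by
        have := List.head_dropWhile_not (· == valor) hne
        simp only [hd, List.head_cons] at this
        simpa using this
      have ih2 : ∀ b : Int, 0 ≤ b → pvGoA valor b 0 (y :: ys) = max b (pvRuns valor (y :: ys)) := by
        rw [← hd]; exact ih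
      have hB : (0 : Int) ≤ max (max best 1) (1 + ((xs.takeWhile (· == valor)).length : Int)) := by
        omega
      have e1 : pvGoA valor (max (max best 1) (1 + ((xs.takeWhile (· == valor)).length : Int)))
          (1 + ((xs.takeWhile (· == valor)).length : Int)) (y :: ys)
          = pvGoA valor (max (max best 1) (1 + ((xs.takeWhile (· == valor)).length : Int))) 0 ys := by
        simp [pvGoA, hy]
      have e2 : pvGoA valor (max (max best 1) (1 + ((xs.takeWhile (· == valor)).length : Int))) 0 (y :: ys)
          = pvGoA valor (max (max best 1) (1 + ((xs.takeWhile (· == valor)).length : Int))) 0 ys := by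
        simp [pvGoA, hy]
      rw [e1, ← e2, ih2 _ hB]
      omega
  | case3 x xs hrest hx ih =>
    intro best hb
    have hall : ∀ a ∈ xs.takeWhile (· == x), a ≠ valor := by
      intro a ha
      have : a = x := by simpa using List.mem_takeWhile_imp ha
      simpa [this] using hx
    have hstep : pvGoA valor best 0 (x :: xs) = pvGoA valor best 0 xs := by
      simp [pvGoA, hx]
    have hskip := pvGoA_skip valor (xs.takeWhile (· == x)) hall best (xs.dropWhile (· == x))
    rw [List.takeWhile_append_dropWhile] at hskip
    have hR : pvRuns valor (x :: xs) = pvRuns valor (xs.dropWhile (· == x)) := by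
      rw [pvRuns, if_neg hx]
    rw [hstep, hskip, hR, ih best hb]

-- ===== VERDICT (by name: the statement is the Claim_ definition above) =====
theorem contar_valores_seguidos_spec : Claim_equal_contar_valores_seguidos := by
  intro arreglo valor _
  unfold Spec_contar_valores_seguidos contar_valores_seguidos contar_valores_seguidos_alt
  have h := pvMain valor arreglo 0 le_rfl
  have h0 := pvRuns_nonneg valor arreglo
  omega
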